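-- pv_equiv track=rewrite | github.com/IbrahimDinho/Big-Data-courseWork | PartD/Gasguzzlers/average_gas.py | reducer
-- ===== SOURCE A (Python) =====
-- def reducer(addr,values):
-- 	gas = None
-- 	check = False
-- 	for value in values:
-- 		if value[2] == 2:
-- 			check = True
-- 		elif value[2] == 1:
-- 			gas = value[0]
-- 			month = value[1]
-- 	if check and gas != None:
-- 		yield(addr,(gas,month))
-- ===== SOURCE B (Python) =====
-- def reducer(addr, values):
--     vals = list(values)
--     if any(v[2] == 2 for v in vals):
--         for v in reversed(vals):
--             if v[2] == 1:
--                 yield (addr, (v[0], v[1]))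
--                 break
-- ===== Notes on version B (the rewrite author's own statement) =====
-- stated objective: alternative
-- what changed: Replaces A's single forward fold carrying mutable gas/month/check state with an any() pass for the flag-2 check plus a reversed-scan that emits the first flag-1 entry from the end (i.e. the last one) and breaks.
import Mathlib
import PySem

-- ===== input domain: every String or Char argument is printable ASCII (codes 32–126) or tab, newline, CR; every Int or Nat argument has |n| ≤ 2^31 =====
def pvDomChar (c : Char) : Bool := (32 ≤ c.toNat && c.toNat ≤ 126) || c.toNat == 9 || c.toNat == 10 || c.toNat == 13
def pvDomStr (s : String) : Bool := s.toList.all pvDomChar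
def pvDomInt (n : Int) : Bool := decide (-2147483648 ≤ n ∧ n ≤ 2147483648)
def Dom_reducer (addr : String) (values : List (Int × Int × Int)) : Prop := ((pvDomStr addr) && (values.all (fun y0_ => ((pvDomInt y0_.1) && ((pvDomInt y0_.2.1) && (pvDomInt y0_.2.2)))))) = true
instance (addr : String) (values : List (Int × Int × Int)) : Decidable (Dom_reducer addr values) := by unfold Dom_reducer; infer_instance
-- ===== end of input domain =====

-- B replaces A's single stateful forward fold by an any() flag-2 check plus a reversed scan for
-- the last flag-1 entry (objective: alternative decomposition, same O(n) cost).


-- ===== PORT A =====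
-- A: one forward pass over values carrying (gas/month, check); yield once at the end if check ∧ gas ≠ None.
-- gas and month are always assigned together in A, so the port carries them as one Option (Int × Int).
def reducer (addr : String) (values : List (Int × Int × Int)) : List (String × (Int × Int)) :=
  let st := values.foldl
    (fun (s : Option (Int × Int) × Bool) v =>
      if v.2.2 == 2 then (s.1, true)
      else if v.2.2 == 1 then (some (v.1, v.2.1), s.2)
      else s)
    (none, false)
  match st with
  | (some gm, true) => [(addr, gm)]
  | _ => []

-- ===== PORT B =====
-- B: any() check for a flag-2 entry, then find the first flag-1 entry of the reversed list.
def reducer_alt (addr : String) (values : List (Int × Int × Int)) : List (String × (Int × Int)) :=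
  if values.any (fun v => v.2.2 == 2) then
    match values.reverse.find? (fun v => v.2.2 == 1) with
    | some v => [(addr, (v.1, v.2.1))]
    | none => []
  else []

-- ===== PRECONDITION & SPEC =====
def Spec_reducer (addr : String) (values : List (Int × Int × Int)) (out : List (String × (Int × Int))) : Prop := out = reducer_alt addr values
instance (addr : String) (values : List (Int × Int × Int)) (out : List (String × (Int × Int))) : Decidable (Spec_reducer addr values out) := by unfold Spec_reducer; infer_instance

-- ===== CLAIM (what is proved, stated in full; the proofs are below) =====
def Claim_equal_reducer : Prop := ∀ (addr : String) (values : List (Int × Int × Int)), Dom_reducer addr values → Spec_reducer addr values (reducer addr values)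

-- ===== LEMMAS AND PROOFS =====

-- ===== VERDICT (by name: the statement is the Claim_ definition above) =====
theorem fold_char (values : List (Int × Int × Int)) (s : Option (Int × Int) × Bool) :
    values.foldl
      (fun (s : Option (Int × Int) × Bool) v =>
        if v.2.2 == 2 then (s.1, true)
        else if v.2.2 == 1 then (some (v.1, v.2.1), s.2)
        else s) s
    = ((match values.reverse.find? (fun v => v.2.2 == 1) with
        | some v => some (v.1, v.2.1)
        | none => s.1),
       s.2 || values.any (fun v => v.2.2 == 2)) := by
  induction values generalizing s with
  | nil => simp
  | cons x t ih =>
    simp only [List.foldl_cons, List.reverse_cons, List.any_cons, ih,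
      List.find?_append]
    by_cases h2 : x.2.2 == 2 <;> by_cases h1 : x.2.2 == 1
    · have e2 : x.2.2 = 2 := by simpa using h2
      have e1 : x.2.2 = 1 := by simpa using h1
      omega
    all_goals
      simp only [h1, h2, if_true, Bool.true_or, Bool.false_or,
        Bool.or_true]
    all_goals cases t.reverse.find? (fun v => v.2.2 == 1) <;>
      simp [h1, h2, Option.orElse, Bool.or_comm]

theorem reducer_spec : Claim_equal_reducer := by
  intro addr values _
  unfold Spec_reducer reducer reducer_alt
  rw [fold_char]
  cases h : values.reverse.find? (fun v => v.2.2 == 1) <;>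
    cases ha : values.any (fun v => v.2.2 == 2) <;> simp [ha]
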